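-- pv_equiv track=rewrite | github.com/bostang/GadgetInventorySystem | F08baru.py | infoUser
-- ===== SOURCE A (Python) =====
-- def isUserinDatabase(user_aktif,database):
--     # memeriksa apakah user ada di array _user atau tidak
--     # KAMUS LOKAL
--         # element : array of string { baris pada database }
--     # ALGORITMA
--     for element in database:
--         if user_aktif == element[1]: # lokasi username ada di kolom kedua
--             return True
--     return False
--
-- def infoUser(username,spek,_user,barisS):
--     # mendapatkan informasi user (nama atau id saja) dari database
--     # KAMUS LOKAL
--         # Variabel
--             # baris : baris pada arrayProcess { untuk skema pencarian }
--     # ALGORITMA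
--     if isUserinDatabase(username,_user): # id menyatakan id user
--         for baris in _user:
--             if baris[1] == username:
--             # me-return informasi
--                 if spek == 'id':
--                     return baris[0]
--                 elif spek == 'nama':
--                     return baris[2]
--     else:
--         return "user tidak ada pada database."
-- ===== SOURCE B (Python) =====
-- COLUMN = {'id': 0, 'nama': 2}  # which column answers each spek
--
-- def infoUser(username, spek, _user, barisS):
--     # declarative: filter the matching rows, then answer from a column table
--     matches = [row for row in _user if row[1] == username]
--     if not matches:
--         return "user tidak ada pada database."
--     col = COLUMN.get(spek)
--     return None if col is None else matches[0][col]
-- ===== Notes on version B (the rewrite author's own statement) =====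
-- stated objective: simpler
-- what changed: Replaced the membership-helper plus search loop with a declarative filter of the matching rows followed by a column-table lookup ({'id':0,'nama':2}) applied to the first match; no explicit search loop or early return remains.
-- outside the precondition, e.g. on infoUser('u', 'id', [['1', 'u', 'Ali'], ['z']], 0): A returns '1', B raises IndexError
import Mathlib
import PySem

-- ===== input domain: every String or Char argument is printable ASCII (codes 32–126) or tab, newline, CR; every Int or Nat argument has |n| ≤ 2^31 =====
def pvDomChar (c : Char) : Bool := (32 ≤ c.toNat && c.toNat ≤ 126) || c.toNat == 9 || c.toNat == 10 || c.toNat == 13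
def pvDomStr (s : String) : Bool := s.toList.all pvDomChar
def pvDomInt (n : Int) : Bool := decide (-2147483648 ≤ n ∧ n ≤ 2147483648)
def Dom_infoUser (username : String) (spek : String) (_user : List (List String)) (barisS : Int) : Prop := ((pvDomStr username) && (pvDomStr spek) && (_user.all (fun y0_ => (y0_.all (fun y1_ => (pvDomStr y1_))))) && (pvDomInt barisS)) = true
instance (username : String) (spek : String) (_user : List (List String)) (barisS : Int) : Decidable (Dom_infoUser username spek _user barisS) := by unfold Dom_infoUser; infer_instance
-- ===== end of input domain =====

-- B replaces A's membership helper + search loop by a filter of the matching rows and a column-table lookup on the first match; objective: simpler.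


-- ===== PORT A =====
-- helper 'isUserinDatabase'; element[1] read with getD: exact inside Pre_ (all rows have ≥ 2 columns)
def isUserinDatabase (user_aktif : String) (database : List (List String)) : Bool :=
  match database with
  | [] => false
  | element :: rest =>
      if user_aktif == element.getD 1 "" then true
      else isUserinDatabase user_aktif rest

-- the 'for baris in _user' loop of infoUser
def infoUserLoopA (username : String) (spek : String) (rows : List (List String)) : Option String :=
  match rows with
  | [] => none
  | baris :: rest =>
      if baris.getD 1 "" == username then
        if spek == "id" then some (baris.getD 0 "")
        else if spek == "nama" then some (baris.getD 2 "")
        else infoUserLoopA username spek rest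
      else infoUserLoopA username spek rest

def infoUser (username : String) (spek : String) (_user : List (List String)) (barisS : Int) : Option String :=
  if isUserinDatabase username _user then infoUserLoopA username spek _user
  else some "user tidak ada pada database."

-- ===== PORT B =====
-- module-level COLUMN = {'id': 0, 'nama': 2}
def pvCOLUMN : PySem.Dict String Int := PySem.Dict.ofList [("id", 0), ("nama", 2)]

def infoUser_alt (username : String) (spek : String) (_user : List (List String)) (barisS : Int) : Option String :=
  match _user.filter (fun row => row.getD 1 "" == username) with
  | [] => some "user tidak ada pada database."
  | row :: _ =>
      match pvCOLUMN.get? spek with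
      | none => none
      | some col => PySem.List.pyGet? row col   -- matches[0][col]; none exactly where Python raises IndexError (outside Pre_)

-- ===== PRECONDITION & SPEC =====
-- Pre_ excludes tables containing a row with fewer than 2 columns, and tables where spek = 'nama' and the
-- first row matching username has fewer than 3 columns: on such inputs Python A can raise IndexError
-- (on a few of them A still returns because a short row sits after an early return; see the cite).
def Pre_infoUser (username : String) (spek : String) (_user : List (List String)) (barisS : Int) : Prop :=
  (∀ r ∈ _user, 2 ≤ r.length) ∧
  (spek = "nama" → ∀ r, _user.find? (fun r => r.getD 1 "" == username) = some r → 3 ≤ r.length)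
instance (username : String) (spek : String) (_user : List (List String)) (barisS : Int) : Decidable (Pre_infoUser username spek _user barisS) := by unfold Pre_infoUser; infer_instance
def pvWitness_infoUser : String × String × List (List String) × Int := ("u", "id", [["1", "u", "Ali"], ["2", "v", "Budi"]], 0)

def Spec_infoUser (username : String) (spek : String) (_user : List (List String)) (barisS : Int) (out : Option String) : Prop := out = infoUser_alt username spek _user barisS
instance (username : String) (spek : String) (_user : List (List String)) (barisS : Int) (out : Option String) : Decidable (Spec_infoUser username spek _user barisS out) := by unfold Spec_infoUser; infer_instance

-- ===== CLAIM (what is proved, stated in full; the proofs are below) =====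
def Claim_equal_infoUser : Prop := ∀ (username : String) (spek : String) (_user : List (List String)) (barisS : Int), Dom_infoUser username spek _user barisS → Pre_infoUser username spek _user barisS → Spec_infoUser username spek _user barisS (infoUser username spek _user barisS)

-- ===== LEMMAS AND PROOFS =====

-- A's membership helper decides whether the filter of matching rows is empty
theorem isUser_filter (username : String) (rows : List (List String)) :
    isUserinDatabase username rows =
      !(rows.filter (fun row => row.getD 1 "" == username)).isEmpty := by
  induction rows with
  | nil => rfl
  | cons r rest ih =>
      simp only [isUserinDatabase, List.filter_cons, List.getD_eq_getElem?_getD,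
        beq_iff_eq] at *
      by_cases h : r[1]?.getD "" = username
      · simp [h]
      · have h' : ¬ username = r[1]?.getD "" := fun e => h (Eq.symm e)
        simp [h, h', ih]

-- A's search loop answers from the head of the filtered list
theorem loopA_filter (username spek : String) (rows : List (List String)) :
    infoUserLoopA username spek rows =
      match rows.filter (fun row => row.getD 1 "" == username) with
      | [] => none
      | row :: _ =>
          if spek = "id" then some (row.getD 0 "")
          else if spek = "nama" then some (row.getD 2 "")
          else none := by
  induction rows with
  | nil => rfl
  | cons r rest ih =>
      simp only [infoUserLoopA, List.filter_cons, List.getD_eq_getElem?_getD,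
        beq_iff_eq]
      by_cases h : r[1]?.getD "" = username
      · by_cases hid : spek = "id"
        · simp [h, hid]
        · by_cases hn : spek = "nama"
          · simp [h, hn]
          · simp only [h, if_true, hid, hn, if_false, ih,
              List.getD_eq_getElem?_getD]
            cases rest.filter (fun row => row[1]?.getD "" == username) <;>
              simp [hn]
      · simp only [h, if_false, ih, List.getD_eq_getElem?_getD]

-- reading column c of a row long enough with pyGet? is the plain getD read
theorem pyGet_row (r : List String) (c : Nat) (h : c < r.length) :
    PySem.List.pyGet? r (c : Int) = some (r.getD c "") := by
  rw [PySem.List.pyGet?_natCast]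
  simp [List.getD_eq_getElem?_getD, List.getElem?_eq_getElem h]

-- ===== VERDICT (by name: the statement is the Claim_ definition above) =====
theorem infoUser_spec : Claim_equal_infoUser := by
  intro username spek _user barisS _ hpre
  unfold Spec_infoUser infoUser infoUser_alt
  rw [isUser_filter, loopA_filter]
  have hcol : pvCOLUMN = PySem.Dict.mk [("id", 0), ("nama", 2)] := by decide
  cases hf : _user.filter (fun row => row.getD 1 "" == username) with
  | nil => simp
  | cons r rest =>
      have hr2 : 2 ≤ r.length := hpre.1 r (List.mem_of_mem_filter (hf ▸ List.mem_cons_self))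
      by_cases hid : spek = "id"
      · have h0 := pyGet_row r 0 (by omega)
        simp only [Int.natCast_zero] at h0
        simp [hid, hcol, PySem.Dict.get?_mk_cons, h0]
      · by_cases hn : spek = "nama"
        · have hfind : _user.find? (fun row => row.getD 1 "" == username) = some r := by
            rw [← List.head?_filter, hf]; rfl
          have hr3 : 3 ≤ r.length := hpre.2 hn r hfind
          have h2 := pyGet_row r 2 (by omega)
          norm_num at h2
          simp [hn, hcol, PySem.Dict.get?_mk_cons, h2]
        · have hid' : ¬ "id" = spek := fun e => hid (Eq.symm e)
          have hn' : ¬ "nama" = spek := fun e => hn (Eq.symm e)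
          simp [hcol, hid', hn', hid, hn, PySem.Dict.get?]
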